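-- pv_equiv track=rewrite | github.com/KathTheDragon/Conlanger | src/syllables.py | generateNonFinals
-- ===== SOURCE A (Python) =====
-- def generateNonFinals(codas, onsets, nuclei):
--     rules = []
--     for crank, coda in enumerate(codas):
--         if coda[-1] == '#':
--             continue
--         elif coda[-1] == '_':
--             coda = coda[:-1]
--         for orank, onset in enumerate(onsets):
--             if onset[0] == '#':
--                 if coda == ['#']:
--                     onset = onset[1:]
--                 else:
--                     continue
--             if onset == ['_']:
--                 onset = []
--             for nrank, nucleus in enumerate(nuclei):
--                 if nucleus[0] == '#':
--                     if coda == ['#'] and onset == []: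
--                         nucleus = nucleus[1:]
--                     else:
--                         continue
--                 pattern = coda + onset + nucleus
--                 breaks = [len(coda)]
--                 if pattern[-1] == '#':
--                     breaks.append(len(pattern)-1)
--                 rank = crank + orank + nrank
--                 rules.append((pattern, breaks, rank))
--     return (r[:2] for r in sorted(rules, key=lambda r: r[2]))
-- ===== SOURCE B (Python) =====
-- def generateNonFinals(codas, onsets, nuclei):
--     # Staged flat passes (codas -> coda/onset pairs -> full triples) and a
--     # rank-range selection pass instead of building rules in nested loops and
--     # comparison-sorting them; ranks are bounded by len(codas)+len(onsets)+len(nuclei).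
--     cs = []
--     for crank, coda in enumerate(codas):
--         if coda[-1] != '#':
--             cs.append((crank, coda[:-1] if coda[-1] == '_' else coda))
--     pairs = []
--     for crank, coda in cs:
--         for orank, onset in enumerate(onsets):
--             if onset[0] == '#':
--                 if coda == ['#']:
--                     pairs.append((crank + orank, coda, onset[1:]))
--             else:
--                 pairs.append((crank + orank, coda, onset))
--     trips = []
--     for r, coda, onset in pairs:
--         if onset == ['_']:
--             onset = []
--         for nrank, nucleus in enumerate(nuclei):
--             if nucleus[0] == '#':
--                 if coda != ['#'] or onset != []:
--                     continue
--                 nucleus = nucleus[1:]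
--             pattern = coda + onset + nucleus
--             breaks = [len(coda)]
--             if pattern[-1] == '#':
--                 breaks.append(len(pattern) - 1)
--             trips.append((r + nrank, pattern, breaks))
--     out = []
--     for r in range(len(codas) + len(onsets) + len(nuclei)):
--         out += [(p, b) for (rr, p, b) in trips if rr == r]
--     return out
-- ===== Notes on version B (the rewrite author's own statement) =====
-- stated objective: alternative
-- what changed: B replaces A's nested-loop accumulation plus comparison sort by three staged flat passes (valid codas, coda/onset pairs, full triples) followed by a rank-range selection pass that emits, for each rank r in range(len(codas)+len(onsets)+len(nuclei)), the triples with that rank in generation order, which reproduces the stable sort-by-rank order without sorting.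
import Mathlib
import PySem

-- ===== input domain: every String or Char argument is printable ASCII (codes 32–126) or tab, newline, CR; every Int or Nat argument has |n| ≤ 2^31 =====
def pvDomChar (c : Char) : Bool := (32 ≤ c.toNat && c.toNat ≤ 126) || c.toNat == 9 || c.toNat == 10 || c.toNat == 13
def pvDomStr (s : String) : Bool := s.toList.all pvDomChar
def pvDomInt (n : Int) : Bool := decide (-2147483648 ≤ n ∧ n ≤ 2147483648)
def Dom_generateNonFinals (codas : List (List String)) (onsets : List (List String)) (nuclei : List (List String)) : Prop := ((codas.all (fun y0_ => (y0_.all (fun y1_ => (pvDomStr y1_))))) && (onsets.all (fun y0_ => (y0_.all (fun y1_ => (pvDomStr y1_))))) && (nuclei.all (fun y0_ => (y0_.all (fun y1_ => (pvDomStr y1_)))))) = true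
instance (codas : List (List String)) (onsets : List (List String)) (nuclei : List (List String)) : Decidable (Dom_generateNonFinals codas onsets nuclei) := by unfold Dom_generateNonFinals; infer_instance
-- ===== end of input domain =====

-- B replaces A's nested-loop accumulation + comparison sort by three staged flat passes
-- (valid codas, then coda/onset pairs, then full triples) and a rank-range selection pass.
-- A returns a generator; the equivalence is about the list of values it yields.

-- ===== PORT A =====
def generateNonFinals (codas : List (List String)) (onsets : List (List String)) (nuclei : List (List String)) : List (List String × List Int) :=
  (PySem.List.sorted
    ((PySem.List.enumerate codas 0).foldl (fun rules cr =>
      if PySem.List.pyGetD cr.2 (-1) "" = "#" then rules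
      else
        let coda := if PySem.List.pyGetD cr.2 (-1) "" = "_" then PySem.List.slice cr.2 none (some (-1)) else cr.2
        (PySem.List.enumerate onsets 0).foldl (fun rules onr =>
          let onset? : Option (List String) :=
            if PySem.List.pyGetD onr.2 0 "" = "#" then
              (if coda = ["#"] then some (PySem.List.slice onr.2 (some 1) none) else none)
            else some onr.2
          match onset? with
          | none => rules
          | some o1 =>
            let onset := if o1 = ["_"] then ([] : List String) else o1
            (PySem.List.enumerate nuclei 0).foldl (fun rules nr =>
              let nuc? : Option (List String) :=
                if PySem.List.pyGetD nr.2 0 "" = "#" then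
                  (if coda = ["#"] ∧ onset = [] then some (PySem.List.slice nr.2 (some 1) none) else none)
                else some nr.2
              match nuc? with
              | none => rules
              | some nucleus =>
                let pattern := coda ++ onset ++ nucleus
                let breaks : List Int :=
                  [(coda.length : Int)] ++
                    (if PySem.List.pyGetD pattern (-1) "" = "#" then [(pattern.length : Int) - 1] else [])
                rules ++ [(pattern, breaks, cr.1 + onr.1 + nr.1)]) rules) rules) [])
    (fun r => r.2.2) false).map (fun r => (r.1, r.2.1))

-- ===== PORT B =====
-- B-side helpers: the second and third staged passes of Source B, one combination step each.
def pvBO (onsets : List (List String)) (c : Int × List String) : List (Int × List String × List String) :=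
  (PySem.List.enumerate onsets 0).filterMap (fun onr =>
    if PySem.List.pyGetD onr.2 0 "" = "#" then
      (if c.2 = ["#"] then some (c.1 + onr.1, c.2, PySem.List.slice onr.2 (some 1) none) else none)
    else some (c.1 + onr.1, c.2, onr.2))

def pvBN (nuclei : List (List String)) (p : Int × List String × List String) : List (Int × List String × List Int) :=
  let onset := if p.2.2 = ["_"] then ([] : List String) else p.2.2
  (PySem.List.enumerate nuclei 0).filterMap (fun nr =>
    match (if PySem.List.pyGetD nr.2 0 "" = "#" then
             (if p.2.1 = ["#"] ∧ onset = [] then some (PySem.List.slice nr.2 (some 1) none) else none)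
           else some nr.2) with
    | none => none
    | some nucleus =>
      let pattern := p.2.1 ++ onset ++ nucleus
      let breaks : List Int :=
        [(p.2.1.length : Int)] ++
          (if PySem.List.pyGetD pattern (-1) "" = "#" then [(pattern.length : Int) - 1] else [])
      some (p.1 + nr.1, pattern, breaks))

def generateNonFinals_alt (codas : List (List String)) (onsets : List (List String)) (nuclei : List (List String)) : List (List String × List Int) :=
  let cs : List (Int × List String) :=
    (PySem.List.enumerate codas 0).filterMap (fun cr =>
      if PySem.List.pyGetD cr.2 (-1) "" ≠ "#" then
        some (cr.1, if PySem.List.pyGetD cr.2 (-1) "" = "_" then PySem.List.slice cr.2 none (some (-1)) else cr.2)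
      else none)
  let pairs := cs.flatMap (pvBO onsets)
  let trips := pairs.flatMap (pvBN nuclei)
  (PySem.List.pyRange 0 ((codas.length + onsets.length + nuclei.length : Nat) : Int) 1).foldl
    (fun out r => out ++ (trips.filter (fun t => t.1 = r)).map (fun t => t.2)) []

-- ===== PRECONDITION & SPEC =====
-- the coda after A's '_'-stripping (used only to state Pre_)
def pvCodaStrip (c : List String) : List String :=
  if c.getLast? = some "_" then c.dropLast else c

-- Pre_ excludes exactly the inputs on which the Python A raises IndexError: an empty list in
-- codas, or an empty list in onsets when some coda reaches the onset loop (its last segment is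
-- not '#'), or an empty list in nuclei when some coda/onset pair reaches the nucleus loop.
def Pre_generateNonFinals (codas : List (List String)) (onsets : List (List String)) (nuclei : List (List String)) : Prop :=
  ([] ∉ codas) ∧
  ((∃ c ∈ codas, c.getLast? ≠ some "#") → [] ∉ onsets) ∧
  ((∃ c ∈ codas, c.getLast? ≠ some "#" ∧ ∃ o ∈ onsets, (o.head? ≠ some "#" ∨ pvCodaStrip c = ["#"])) → [] ∉ nuclei)
instance (codas : List (List String)) (onsets : List (List String)) (nuclei : List (List String)) : Decidable (Pre_generateNonFinals codas onsets nuclei) := by unfold Pre_generateNonFinals; infer_instance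

def pvWitness_generateNonFinals : List (List String) × List (List String) × List (List String) :=
  ([["a"], ["b", "_"], ["#", "_"], ["x", "#"]], [["#", "t"], ["_"], ["s"]], [["a"], ["#", "i"]])

def Spec_generateNonFinals (codas : List (List String)) (onsets : List (List String)) (nuclei : List (List String)) (out : List (List String × List Int)) : Prop := out = generateNonFinals_alt codas onsets nuclei
instance (codas : List (List String)) (onsets : List (List String)) (nuclei : List (List String)) (out : List (List String × List Int)) : Decidable (Spec_generateNonFinals codas onsets nuclei out) := by unfold Spec_generateNonFinals; infer_instance

-- ===== CLAIM (what is proved, stated in full; the proofs are below) =====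
def Claim_equal_generateNonFinals : Prop := ∀ (codas : List (List String)) (onsets : List (List String)) (nuclei : List (List String)), Dom_generateNonFinals codas onsets nuclei → Pre_generateNonFinals codas onsets nuclei → Spec_generateNonFinals codas onsets nuclei (generateNonFinals codas onsets nuclei)

-- ===== LEMMAS AND PROOFS =====

-- The flat list of generated (pattern, breaks, rank) triples, in generation order (A's order).
def pvGN (_nuclei : List (List String)) (coda onset : List String) (corank : Int) (nr : Int × List String) : List (List String × List Int × Int) :=
  let nuc? : Option (List String) :=
    if PySem.List.pyGetD nr.2 0 "" = "#" then
      (if coda = ["#"] ∧ onset = [] then some (PySem.List.slice nr.2 (some 1) none) else none)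
    else some nr.2
  match nuc? with
  | none => []
  | some nucleus =>
    let pattern := coda ++ onset ++ nucleus
    let breaks : List Int :=
      [(coda.length : Int)] ++
        (if PySem.List.pyGetD pattern (-1) "" = "#" then [(pattern.length : Int) - 1] else [])
    [(pattern, breaks, corank + nr.1)]

def pvGO (_onsets : List (List String)) (nuclei : List (List String)) (coda : List String) (crank : Int) (onr : Int × List String) : List (List String × List Int × Int) :=
  let onset? : Option (List String) :=
    if PySem.List.pyGetD onr.2 0 "" = "#" then
      (if coda = ["#"] then some (PySem.List.slice onr.2 (some 1) none) else none)
    else some onr.2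
  match onset? with
  | none => []
  | some o1 =>
    let onset := if o1 = ["_"] then ([] : List String) else o1
    (PySem.List.enumerate nuclei 0).flatMap (pvGN nuclei coda onset (crank + onr.1))

def pvGC (onsets nuclei : List (List String)) (cr : Int × List String) : List (List String × List Int × Int) :=
  if PySem.List.pyGetD cr.2 (-1) "" = "#" then []
  else
    let coda := if PySem.List.pyGetD cr.2 (-1) "" = "_" then PySem.List.slice cr.2 none (some (-1)) else cr.2
    (PySem.List.enumerate onsets 0).flatMap (pvGO onsets nuclei coda cr.1)

def pvTrips (codas onsets nuclei : List (List String)) : List (List String × List Int × Int) :=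
  (PySem.List.enumerate codas 0).flatMap (pvGC onsets nuclei)

-- reshuffle A's triple layout into B's (rank first)
def pvSw (t : List String × List Int × Int) : Int × List String × List Int := (t.2.2, t.1, t.2.1)

theorem pvLevNA (nuclei : List (List String)) (coda onset : List String) (cor : Int)
    (racc : List (List String × List Int × Int)) :
    (PySem.List.enumerate nuclei 0).foldl (fun rules nr =>
      let nuc? : Option (List String) :=
        if PySem.List.pyGetD nr.2 0 "" = "#" then
          (if coda = ["#"] ∧ onset = [] then some (PySem.List.slice nr.2 (some 1) none) else none)
        else some nr.2
      match nuc? with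
      | none => rules
      | some nucleus =>
        let pattern := coda ++ onset ++ nucleus
        let breaks : List Int :=
          [(coda.length : Int)] ++
            (if PySem.List.pyGetD pattern (-1) "" = "#" then [(pattern.length : Int) - 1] else [])
        rules ++ [(pattern, breaks, cor + nr.1)]) racc
    = racc ++ (PySem.List.enumerate nuclei 0).flatMap (pvGN nuclei coda onset cor) := by
  have h : ∀ (rules : List (List String × List Int × Int)) (nr : Int × List String),
      (fun (rules : List (List String × List Int × Int)) (nr : Int × List String) =>
        let nuc? : Option (List String) :=
          if PySem.List.pyGetD nr.2 0 "" = "#" then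
            (if coda = ["#"] ∧ onset = [] then some (PySem.List.slice nr.2 (some 1) none) else none)
          else some nr.2
        match nuc? with
        | none => rules
        | some nucleus =>
          let pattern := coda ++ onset ++ nucleus
          let breaks : List Int :=
            [(coda.length : Int)] ++
              (if PySem.List.pyGetD pattern (-1) "" = "#" then [(pattern.length : Int) - 1] else [])
          rules ++ [(pattern, breaks, cor + nr.1)]) rules nr
      = rules ++ pvGN nuclei coda onset cor nr := by
    intro rules nr
    simp only [pvGN]
    split <;> simp
  simp only [h]
  exact PySem.List.foldl_append_eq_flatMap _ _ _

theorem pvLevOA (onsets nuclei : List (List String)) (coda : List String) (crank : Int)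
    (racc : List (List String × List Int × Int)) :
    (PySem.List.enumerate onsets 0).foldl (fun rules onr =>
      let onset? : Option (List String) :=
        if PySem.List.pyGetD onr.2 0 "" = "#" then
          (if coda = ["#"] then some (PySem.List.slice onr.2 (some 1) none) else none)
        else some onr.2
      match onset? with
      | none => rules
      | some o1 =>
        let onset := if o1 = ["_"] then ([] : List String) else o1
        (PySem.List.enumerate nuclei 0).foldl (fun rules nr =>
          let nuc? : Option (List String) :=
            if PySem.List.pyGetD nr.2 0 "" = "#" then
              (if coda = ["#"] ∧ onset = [] then some (PySem.List.slice nr.2 (some 1) none) else none)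
            else some nr.2
          match nuc? with
          | none => rules
          | some nucleus =>
            let pattern := coda ++ onset ++ nucleus
            let breaks : List Int :=
              [(coda.length : Int)] ++
                (if PySem.List.pyGetD pattern (-1) "" = "#" then [(pattern.length : Int) - 1] else [])
            rules ++ [(pattern, breaks, crank + onr.1 + nr.1)]) rules) racc
    = racc ++ (PySem.List.enumerate onsets 0).flatMap (pvGO onsets nuclei coda crank) := by
  have h2 : ∀ (rules : List (List String × List Int × Int)) (onr : Int × List String),
      (fun (rules : List (List String × List Int × Int)) (onr : Int × List String) =>
        let onset? : Option (List String) :=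
          if PySem.List.pyGetD onr.2 0 "" = "#" then
            (if coda = ["#"] then some (PySem.List.slice onr.2 (some 1) none) else none)
          else some onr.2
        match onset? with
        | none => rules
        | some o1 =>
          let onset := if o1 = ["_"] then ([] : List String) else o1
          (PySem.List.enumerate nuclei 0).foldl (fun rules nr =>
            let nuc? : Option (List String) :=
              if PySem.List.pyGetD nr.2 0 "" = "#" then
                (if coda = ["#"] ∧ onset = [] then some (PySem.List.slice nr.2 (some 1) none) else none)
              else some nr.2
            match nuc? with
            | none => rules
            | some nucleus =>
              let pattern := coda ++ onset ++ nucleus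
              let breaks : List Int :=
                [(coda.length : Int)] ++
                  (if PySem.List.pyGetD pattern (-1) "" = "#" then [(pattern.length : Int) - 1] else [])
              rules ++ [(pattern, breaks, crank + onr.1 + nr.1)]) rules) rules onr
      = rules ++ pvGO onsets nuclei coda crank onr := by
    intro rules onr
    simp only [pvGO]
    split
    · simp
    · exact pvLevNA nuclei coda _ _ rules
  simp only [h2]
  exact PySem.List.foldl_append_eq_flatMap _ _ _

-- A's rules list is pvTrips
theorem pvRulesA (codas onsets nuclei : List (List String)) :
    (PySem.List.enumerate codas 0).foldl (fun rules cr =>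
      if PySem.List.pyGetD cr.2 (-1) "" = "#" then rules
      else
        let coda := if PySem.List.pyGetD cr.2 (-1) "" = "_" then PySem.List.slice cr.2 none (some (-1)) else cr.2
        (PySem.List.enumerate onsets 0).foldl (fun rules onr =>
          let onset? : Option (List String) :=
            if PySem.List.pyGetD onr.2 0 "" = "#" then
              (if coda = ["#"] then some (PySem.List.slice onr.2 (some 1) none) else none)
            else some onr.2
          match onset? with
          | none => rules
          | some o1 =>
            let onset := if o1 = ["_"] then ([] : List String) else o1
            (PySem.List.enumerate nuclei 0).foldl (fun rules nr =>
              let nuc? : Option (List String) :=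
                if PySem.List.pyGetD nr.2 0 "" = "#" then
                  (if coda = ["#"] ∧ onset = [] then some (PySem.List.slice nr.2 (some 1) none) else none)
                else some nr.2
              match nuc? with
              | none => rules
              | some nucleus =>
                let pattern := coda ++ onset ++ nucleus
                let breaks : List Int :=
                  [(coda.length : Int)] ++
                    (if PySem.List.pyGetD pattern (-1) "" = "#" then [(pattern.length : Int) - 1] else [])
                rules ++ [(pattern, breaks, cr.1 + onr.1 + nr.1)]) rules) rules) []
    = pvTrips codas onsets nuclei := by
  have h : ∀ (rules : List (List String × List Int × Int)) (cr : Int × List String),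
      (fun (rules : List (List String × List Int × Int)) (cr : Int × List String) =>
        if PySem.List.pyGetD cr.2 (-1) "" = "#" then rules
        else
          let coda := if PySem.List.pyGetD cr.2 (-1) "" = "_" then PySem.List.slice cr.2 none (some (-1)) else cr.2
          (PySem.List.enumerate onsets 0).foldl (fun rules onr =>
            let onset? : Option (List String) :=
              if PySem.List.pyGetD onr.2 0 "" = "#" then
                (if coda = ["#"] then some (PySem.List.slice onr.2 (some 1) none) else none)
              else some onr.2
            match onset? with
            | none => rules
            | some o1 =>
              let onset := if o1 = ["_"] then ([] : List String) else o1
              (PySem.List.enumerate nuclei 0).foldl (fun rules nr =>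
                let nuc? : Option (List String) :=
                  if PySem.List.pyGetD nr.2 0 "" = "#" then
                    (if coda = ["#"] ∧ onset = [] then some (PySem.List.slice nr.2 (some 1) none) else none)
                  else some nr.2
                match nuc? with
                | none => rules
                | some nucleus =>
                  let pattern := coda ++ onset ++ nucleus
                  let breaks : List Int :=
                    [(coda.length : Int)] ++
                      (if PySem.List.pyGetD pattern (-1) "" = "#" then [(pattern.length : Int) - 1] else [])
                  rules ++ [(pattern, breaks, cr.1 + onr.1 + nr.1)]) rules) rules) rules cr
      = rules ++ pvGC onsets nuclei cr := by
    intro rules cr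
    simp only [pvGC]
    split
    · simp
    · exact pvLevOA onsets nuclei _ cr.1 rules
  simp only [h]
  simpa using PySem.List.foldl_append_eq_flatMap (pvGC onsets nuclei) (PySem.List.enumerate codas 0) []

-- generic bridges between filterMap-style stages and flatMaps
theorem pv_filterMap_eq_flatMap {α β : Type} (f : α → Option β) (l : List α) :
    l.filterMap f = l.flatMap (fun x => (f x).toList) := by
  induction l with
  | nil => simp
  | cons a t ih => cases hf : f a <;> simp [hf, ih]

theorem pv_flatMap_filterMap {α β γ : Type} (f : α → Option β) (g : β → List γ) (l : List α) :
    (l.filterMap f).flatMap g = l.flatMap (fun x => ((f x).map g).getD []) := by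
  induction l with
  | nil => simp
  | cons a t ih => cases hf : f a <;> simp [hf, ih]

-- nucleus stage: A's pvGN sequence, relabelled by pvSw, is B's pvBN pass
theorem pvLN (nuclei : List (List String)) (coda o1 : List String) (cor : Int) :
    ((PySem.List.enumerate nuclei 0).flatMap
        (pvGN nuclei coda (if o1 = ["_"] then ([] : List String) else o1) cor)).map pvSw
      = pvBN nuclei (cor, coda, o1) := by
  unfold pvBN
  rw [List.map_flatMap, pv_filterMap_eq_flatMap]
  apply List.flatMap_congr
  intro nr _
  simp only [pvGN]
  split
  · simp
  · simp [pvSw]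

-- onset stage: A's pvGO sequence, relabelled by pvSw, is B's pair-then-pvBN pass
theorem pvLO (onsets nuclei : List (List String)) (coda : List String) (crank : Int) :
    ((PySem.List.enumerate onsets 0).flatMap (pvGO onsets nuclei coda crank)).map pvSw
      = ((pvBO onsets (crank, coda)).flatMap (pvBN nuclei)) := by
  unfold pvBO
  rw [List.map_flatMap, pv_flatMap_filterMap]
  apply List.flatMap_congr
  intro onr _
  by_cases h : PySem.List.pyGetD onr.2 0 "" = "#"
  · by_cases hc : coda = ["#"]
    · simp only [pvGO, h, hc, if_true, Option.map_some, Option.getD_some]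
      rw [hc] at *
      exact pvLN nuclei ["#"] (PySem.List.slice onr.2 (some 1) none) (crank + onr.1)
    · simp [pvGO, h, hc]
  · simp only [pvGO, h, if_false, Option.map_some, Option.getD_some]
    exact pvLN nuclei coda onr.2 (crank + onr.1)

-- B's trips list is A's pvTrips relabelled by pvSw
theorem pvTripsB (codas onsets nuclei : List (List String)) :
    (((PySem.List.enumerate codas 0).filterMap (fun cr =>
        if PySem.List.pyGetD cr.2 (-1) "" ≠ "#" then
          some (cr.1, if PySem.List.pyGetD cr.2 (-1) "" = "_" then PySem.List.slice cr.2 none (some (-1)) else cr.2)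
        else none)).flatMap (pvBO onsets)).flatMap (pvBN nuclei)
      = (pvTrips codas onsets nuclei).map pvSw := by
  unfold pvTrips
  rw [List.flatMap_assoc, pv_flatMap_filterMap, List.map_flatMap]
  apply List.flatMap_congr
  intro cr _
  simp only [pvGC]
  by_cases h : PySem.List.pyGetD cr.2 (-1) "" = "#"
  · simp [h]
  · simp only [h, if_false, ne_eq, not_false_eq_true, if_true, Option.map_some, Option.getD_some]
    exact (pvLO onsets nuclei _ cr.1).symm

-- every generated rank is a Nat below the bucket count
theorem pvRankBound (codas onsets nuclei : List (List String)) :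
    ∀ t ∈ pvTrips codas onsets nuclei,
      ∃ j : Nat, j < codas.length + onsets.length + nuclei.length ∧ t.2.2 = (j : Int) := by
  intro t ht
  simp only [pvTrips, List.mem_flatMap] at ht
  obtain ⟨cr, hcr, ht⟩ := ht
  obtain ⟨kc, hkc, hcr⟩ := (PySem.List.mem_enumerate_iff codas 0 cr).mp hcr
  simp only [pvGC] at ht
  split at ht
  · simp at ht
  · rw [List.mem_flatMap] at ht
    obtain ⟨onr, honr, ht⟩ := ht
    obtain ⟨ko, hko, honr⟩ := (PySem.List.mem_enumerate_iff onsets 0 onr).mp honr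
    simp only [pvGO] at ht
    split at ht
    · simp at ht
    · rw [List.mem_flatMap] at ht
      obtain ⟨nr, hnr, ht⟩ := ht
      obtain ⟨kn, hkn, hnr⟩ := (PySem.List.mem_enumerate_iff nuclei 0 nr).mp hnr
      simp only [pvGN] at ht
      split at ht
      · simp at ht
      · simp only [List.mem_singleton] at ht
        refine ⟨kc + ko + kn, by omega, ?_⟩
        subst ht hcr honr hnr
        push_cast
        ring

theorem pvInsertBySplit {α : Type} (k : α → Int) (x : α) (ys zs : List α)
    (h1 : ∀ y ∈ ys, ¬ k x < k y) (h2 : ∀ z ∈ zs, k x < k z) :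
    PySem.List.insertBy (fun a b => decide (k a < k b)) x (ys ++ zs) = ys ++ x :: zs := by
  induction ys with
  | nil =>
    cases zs with
    | nil => simp [PySem.List.insertBy]
    | cons z zs => simp [PySem.List.insertBy, h2 z (by simp)]
  | cons y ys ih =>
    have hy : ¬ k x < k y := h1 y (by simp)
    simp only [List.cons_append, PySem.List.insertBy, hy, decide_false, Bool.false_eq_true,
      if_false, List.cons.injEq, true_and]
    exact ih (fun y hy => h1 y (by simp [hy]))

theorem pvInsertBucket {α : Type} (k : α → Int) (R : Nat) (x : α) (L : List α)
    (j : Nat) (hj : j < R) (hx : k x = (j : Int)) :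
    PySem.List.insertBy (fun a b => decide (k a < k b)) x
        ((PySem.List.pyRange 0 R 1).flatMap (fun i => L.filter (fun y => k y = i)))
      = (PySem.List.pyRange 0 R 1).flatMap (fun i => (L ++ [x]).filter (fun y => k y = i)) := by
  have hsplit : PySem.List.pyRange 0 R 1
      = PySem.List.pyRange 0 ((j : Int) + 1) 1 ++ PySem.List.pyRange ((j : Int) + 1) R 1 :=
    PySem.List.pyRange_one_append 0 ((j : Int) + 1) R (by omega) (by exact_mod_cast hj)
  rw [hsplit, List.flatMap_append, List.flatMap_append]
  rw [pvInsertBySplit]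
  · have hstep : PySem.List.pyRange 0 ((j : Int) + 1) 1
        = PySem.List.pyRange 0 (j : Int) 1 ++ [(j : Int)] :=
      PySem.List.pyRange_one_succ_right (by omega)
    rw [hstep, List.flatMap_append, List.flatMap_append]
    have hlt : ∀ i ∈ PySem.List.pyRange 0 (j : Int) 1,
        (L ++ [x]).filter (fun y => k y = i) = L.filter (fun y => k y = i) := by
      intro i hi
      have hm := PySem.List.mem_pyRange_one.mp hi
      rw [List.filter_append]
      have : ¬ (k x = i) := by rw [hx]; omega
      simp [this]
    have hgt : ∀ i ∈ PySem.List.pyRange ((j : Int) + 1) R 1,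
        (L ++ [x]).filter (fun y => k y = i) = L.filter (fun y => k y = i) := by
      intro i hi
      have hm := PySem.List.mem_pyRange_one.mp hi
      rw [List.filter_append]
      have : ¬ (k x = i) := by rw [hx]; omega
      simp [this]
    rw [List.flatMap_congr hlt, List.flatMap_congr hgt]
    simp [List.filter_append, hx]
  · intro y hy
    rw [List.mem_flatMap] at hy
    obtain ⟨i, hi, hyf⟩ := hy
    have hm := PySem.List.mem_pyRange_one.mp hi
    have hk : k y = i := by simpa using (List.mem_filter.mp hyf).2
    rw [hx, hk]
    omega
  · intro z hz
    rw [List.mem_flatMap] at hz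
    obtain ⟨i, hi, hzf⟩ := hz
    have hm := PySem.List.mem_pyRange_one.mp hi
    have hk : k z = i := by simpa using (List.mem_filter.mp hzf).2
    rw [hx, hk]
    omega

-- stable sort on keys ranging over [0, R) is per-rank concatenation
theorem pvSortedBuckets {α : Type} (k : α → Int) (R : Nat) (xs : List α)
    (h : ∀ x ∈ xs, ∃ j : Nat, j < R ∧ k x = (j : Int)) :
    PySem.List.sorted xs k false
      = (PySem.List.pyRange 0 R 1).flatMap (fun i => xs.filter (fun x => k x = i)) := by
  rw [PySem.List.sorted_eq_foldl_insertBy]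
  have main : ∀ (ys L : List α), (∀ x ∈ ys, ∃ j : Nat, j < R ∧ k x = (j : Int)) →
      ys.foldl (fun acc x => PySem.List.insertBy (fun a b => decide (k a < k b)) x acc)
          ((PySem.List.pyRange 0 R 1).flatMap (fun i => L.filter (fun x => k x = i)))
        = (PySem.List.pyRange 0 R 1).flatMap (fun i => (L ++ ys).filter (fun x => k x = i)) := by
    intro ys
    induction ys with
    | nil => intro L _; simp
    | cons x ys ih =>
      intro L hy
      obtain ⟨j, hj, hx⟩ := hy x (by simp)
      rw [List.foldl_cons, pvInsertBucket k R x L j hj hx,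
        ih (L ++ [x]) (fun t ht => hy t (by simp [ht]))]
      simp
  have h0 : (PySem.List.pyRange 0 R 1).flatMap (fun i => ([] : List α).filter (fun x => k x = i)) = [] := by
    simp
  have := main xs [] h
  rw [h0] at this
  simpa using this

-- ===== VERDICT (by name: the statement is the Claim_ definition above) =====
theorem generateNonFinals_spec : Claim_equal_generateNonFinals := by
  intro codas onsets nuclei _ _
  unfold Spec_generateNonFinals generateNonFinals
  rw [pvRulesA]
  simp only [generateNonFinals_alt]
  rw [pvTripsB,
    PySem.List.foldl_append_eq_flatMap
      (fun r => (((pvTrips codas onsets nuclei).map pvSw).filter (fun t => t.1 = r)).map (fun t => t.2))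
      (PySem.List.pyRange 0 ((codas.length + onsets.length + nuclei.length : Nat) : Int) 1) [],
    pvSortedBuckets _ _ _ (pvRankBound codas onsets nuclei),
    List.map_flatMap, List.nil_append]
  apply List.flatMap_congr
  intro i _
  rw [List.filter_map, List.map_map]
  apply congrArg₂
  · funext t
    simp [pvSw, Function.comp]
  · apply List.filter_congr
    intro t _
    simp [pvSw]
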